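-- pv_equiv track=rewrite | github.com/octobrium/TEOF | tools/autonomy/governance_alert.py | _diff_hashes
-- ===== SOURCE A (Python) =====
-- from typing import Dict, Iterable, List, Mapping, Tuple
--
-- def _diff_hashes(old: Mapping[str, str], new: Mapping[str, str]) -> Tuple[List[str], List[str], List[Mapping[str, str]]]:
--     added = sorted(path for path in new.keys() if path not in old)
--     removed = sorted(path for path in old.keys() if path not in new)
--     changed: List[Mapping[str, str]] = []
--     for path, new_hash in new.items():
--         old_hash = old.get(path)
--         if old_hash is not None and old_hash != new_hash:
--             changed.append({"path": path, "old_hash": old_hash, "new_hash": new_hash})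
--     changed.sort(key=lambda entry: entry["path"])
--     return added, removed, changed
-- ===== SOURCE B (Python) =====
-- from typing import Dict, Iterable, List, Mapping, Tuple
--
-- def _diff_hashes(old: Mapping[str, str], new: Mapping[str, str]) -> Tuple[List[str], List[str], List[Mapping[str, str]]]:
--     added: List[str] = []
--     removed: List[str] = []
--     changed: List[Mapping[str, str]] = []
--     for path in sorted(set(old) | set(new)):
--         if path not in old:
--             added.append(path)
--         elif path not in new:
--             removed.append(path)
--         elif old[path] != new[path]:
--             changed.append({"path": path, "old_hash": old[path], "new_hash": new[path]})
--     return added, removed, changed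
-- ===== Notes on version B (the rewrite author's own statement) =====
-- stated objective: simpler
-- what changed: Instead of three separate filtered passes (two sorted comprehensions plus an insertion-order loop followed by a sort), B makes one pass over the pre-sorted union of the key sets and classifies each path into added/removed/changed, so no post-sorting is needed.
import Mathlib
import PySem

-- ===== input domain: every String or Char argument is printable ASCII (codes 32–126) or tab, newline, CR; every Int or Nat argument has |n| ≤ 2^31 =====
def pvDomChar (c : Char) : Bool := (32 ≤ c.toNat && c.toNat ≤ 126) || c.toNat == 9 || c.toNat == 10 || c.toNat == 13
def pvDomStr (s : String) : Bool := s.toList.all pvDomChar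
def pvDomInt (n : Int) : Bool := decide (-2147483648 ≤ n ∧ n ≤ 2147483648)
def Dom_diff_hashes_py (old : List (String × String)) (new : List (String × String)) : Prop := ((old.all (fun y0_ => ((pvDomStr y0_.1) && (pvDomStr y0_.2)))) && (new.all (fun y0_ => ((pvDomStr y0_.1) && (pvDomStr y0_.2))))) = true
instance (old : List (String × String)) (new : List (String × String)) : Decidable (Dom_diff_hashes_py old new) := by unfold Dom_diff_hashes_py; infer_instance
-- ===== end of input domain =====

-- B replaces A's three filtered/sorted passes by one classifying pass over the pre-sorted union of keys (objective: simpler).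


-- ===== PORT A =====
-- literal port of _diff_hashes: the input assoc lists become dicts (PySem.Dict.ofList = Python dict(pairs));
-- the sort key entry["path"] is ported as getD "path" "" — exact here because every entry built carries "path".
def diff_hashes_py (old : List (String × String)) (new : List (String × String)) : List String × List String × (List (List (String × String))) :=
  let oldD := PySem.Dict.ofList old
  let newD := PySem.Dict.ofList new
  let added := PySem.List.sorted ((PySem.Dict.keys newD).filter (fun path => !(PySem.Dict.contains oldD path))) (fun x => x) false
  let removed := PySem.List.sorted ((PySem.Dict.keys oldD).filter (fun path => !(PySem.Dict.contains newD path))) (fun x => x) false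
  let changed := newD.items.foldl (fun (acc : List (List (String × String))) pn =>
      match PySem.Dict.get? oldD pn.1 with
      | none => acc
      | some old_hash =>
        if old_hash ≠ pn.2 then
          acc ++ [[("path", pn.1), ("old_hash", old_hash), ("new_hash", pn.2)]]
        else acc) []
  (added, removed, PySem.List.sorted changed (fun entry => PySem.Dict.getD (PySem.Dict.mk entry) "path" "") false)

-- ===== PORT B =====
def diff_hashes_py_alt (old : List (String × String)) (new : List (String × String)) : List String × List String × (List (List (String × String))) :=
  let oldD := PySem.Dict.ofList old
  let newD := PySem.Dict.ofList new
  let keys := PySem.List.sorted (PySem.Set.union (PySem.Set.ofList (PySem.Dict.keys oldD)) (PySem.Dict.keys newD)) (fun x => x) false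
  keys.foldl (fun (acc : List String × List String × List (List (String × String))) path =>
      if !(PySem.Dict.contains oldD path) then (acc.1 ++ [path], acc.2.1, acc.2.2)
      else if !(PySem.Dict.contains newD path) then (acc.1, acc.2.1 ++ [path], acc.2.2)
      else if PySem.Dict.getD oldD path "" ≠ PySem.Dict.getD newD path "" then
        (acc.1, acc.2.1, acc.2.2 ++ [[("path", path), ("old_hash", PySem.Dict.getD oldD path ""), ("new_hash", PySem.Dict.getD newD path "")]])
      else acc) ([], [], [])

-- ===== PRECONDITION & SPEC =====
def Spec_diff_hashes_py (old : List (String × String)) (new : List (String × String)) (out : List String × List String × (List (List (String × String)))) : Prop := out = diff_hashes_py_alt old new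
instance (old : List (String × String)) (new : List (String × String)) (out : List String × List String × (List (List (String × String)))) : Decidable (Spec_diff_hashes_py old new out) := by unfold Spec_diff_hashes_py; infer_instance

-- ===== CLAIM (what is proved, stated in full; the proofs are below) =====
def Claim_equal_diff_hashes_py : Prop := ∀ (old : List (String × String)) (new : List (String × String)), Dom_diff_hashes_py old new → Spec_diff_hashes_py old new (diff_hashes_py old new)

-- ===== LEMMAS AND PROOFS =====

-- B's single classifying fold, split into its three filtered accumulators
theorem pvB_fold (oldD newD : PySem.Dict String String) (K : List String)
    (acc : List String × List String × List (List (String × String))) :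
    K.foldl (fun (acc : List String × List String × List (List (String × String))) path =>
      if !(PySem.Dict.contains oldD path) then (acc.1 ++ [path], acc.2.1, acc.2.2)
      else if !(PySem.Dict.contains newD path) then (acc.1, acc.2.1 ++ [path], acc.2.2)
      else if PySem.Dict.getD oldD path "" ≠ PySem.Dict.getD newD path "" then
        (acc.1, acc.2.1, acc.2.2 ++ [[("path", path), ("old_hash", PySem.Dict.getD oldD path ""), ("new_hash", PySem.Dict.getD newD path "")]])
      else acc) acc
    = (acc.1 ++ K.filter (fun p => !(PySem.Dict.contains oldD p)),
       acc.2.1 ++ K.filter (fun p => PySem.Dict.contains oldD p && !(PySem.Dict.contains newD p)),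
       acc.2.2 ++ (K.filter (fun p => PySem.Dict.contains oldD p && PySem.Dict.contains newD p
                      && decide (PySem.Dict.getD oldD p "" ≠ PySem.Dict.getD newD p ""))).map
         (fun p => [("path", p), ("old_hash", PySem.Dict.getD oldD p ""), ("new_hash", PySem.Dict.getD newD p "")])) := by
  induction K generalizing acc with
  | nil => simp
  | cons x t ih =>
    rw [List.foldl_cons]
    cases hc1 : PySem.Dict.contains oldD x with
    | false => rw [ih]; simp [hc1]
    | true =>
      cases hc2 : PySem.Dict.contains newD x with
      | false => rw [ih]; simp [hc1, hc2]
      | true =>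
        by_cases hne : PySem.Dict.getD oldD x "" = PySem.Dict.getD newD x ""
        · rw [if_neg (by simp), if_neg (by simp), if_neg (not_not_intro hne), ih]
          simp [hc1, hc2, hne]
        · rw [if_neg (by simp), if_neg (by simp), if_pos hne, ih]
          simp [hc1, hc2, hne]

-- A's changed-building loop, as filter + map over the items
theorem pvA_fold (oldD : PySem.Dict String String) (items : List (String × String))
    (acc : List (List (String × String))) :
    items.foldl (fun (acc : List (List (String × String))) pn =>
      match PySem.Dict.get? oldD pn.1 with
      | none => acc
      | some old_hash =>
        if old_hash ≠ pn.2 then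
          acc ++ [[("path", pn.1), ("old_hash", old_hash), ("new_hash", pn.2)]]
        else acc) acc
    = acc ++ (items.filter (fun pn => (PySem.Dict.get? oldD pn.1).isSome
                  && decide (PySem.Dict.getD oldD pn.1 "" ≠ pn.2))).map
        (fun pn => [("path", pn.1), ("old_hash", PySem.Dict.getD oldD pn.1 ""), ("new_hash", pn.2)]) := by
  induction items generalizing acc with
  | nil => simp
  | cons x t ih =>
    rw [List.foldl_cons, List.filter_cons]
    cases hg : PySem.Dict.get? oldD x.1 with
    | none => exact ih acc
    | some oh =>
      have hD : PySem.Dict.getD oldD x.1 "" = oh := PySem.Dict.getD_of_get?_eq_some _ _ hg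
      have hstep : (match (some oh : Option String) with
          | none => acc
          | some old_hash =>
            if old_hash ≠ x.2 then acc ++ [[("path", x.1), ("old_hash", old_hash), ("new_hash", x.2)]]
            else acc)
          = if oh ≠ x.2 then acc ++ [[("path", x.1), ("old_hash", oh), ("new_hash", x.2)]] else acc := rfl
      rw [hstep]
      by_cases hne : oh = x.2
      · rw [if_neg (by simp [hne]),
          show ((some oh).isSome && decide (PySem.Dict.getD oldD x.1 "" ≠ x.2)) = false by simp [hD, hne],
          ih]
        simp
      · rw [if_pos hne,
          show ((some oh).isSome && decide (PySem.Dict.getD oldD x.1 "" ≠ x.2)) = true by simp [hD, hne],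
          ih]
        simp [hD]

-- the sorted union of the two key sets, B's iteration order
def pvK (oldD newD : PySem.Dict String String) : List String :=
  PySem.List.sorted (PySem.Set.ofList (PySem.Dict.keys oldD ++ PySem.Dict.keys newD)) (fun x => x) false

theorem pvK_pairwise (oldD newD : PySem.Dict String String) : (pvK oldD newD).Pairwise (· < ·) :=
  PySem.List.sorted_ofList_pairwise_lt ..

theorem pvK_nodup (oldD newD : PySem.Dict String String) : (pvK oldD newD).Nodup :=
  (pvK_pairwise oldD newD).imp fun h => ne_of_lt h

theorem pvK_mem (oldD newD : PySem.Dict String String) (x : String) :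
    x ∈ pvK oldD newD ↔ x ∈ PySem.Dict.keys oldD ∨ x ∈ PySem.Dict.keys newD := by
  simp [pvK, PySem.List.mem_sorted, PySem.Set.mem_ofList]

theorem pv_added (oldD newD : PySem.Dict String String)
    (hnn : (PySem.Dict.keys newD).Nodup) :
    PySem.List.sorted ((PySem.Dict.keys newD).filter (fun path => !(PySem.Dict.contains oldD path))) (fun x => x) false
    = (pvK oldD newD).filter (fun p => !(PySem.Dict.contains oldD p)) := by
  apply PySem.List.sorted_eq_of_perm_of_pairwise_lt
  · rw [List.perm_ext_iff_of_nodup ((pvK_nodup oldD newD).filter _) (hnn.filter _)]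
    intro a
    simp only [List.mem_filter, pvK_mem, Bool.not_eq_eq_eq_not, Bool.not_true,
      ← PySem.Dict.contains_iff_mem_keys]
    cases h : PySem.Dict.contains oldD a <;> simp
  · exact List.Pairwise.sublist List.filter_sublist (pvK_pairwise oldD newD)

theorem pv_removed (oldD newD : PySem.Dict String String)
    (hno : (PySem.Dict.keys oldD).Nodup) :
    PySem.List.sorted ((PySem.Dict.keys oldD).filter (fun path => !(PySem.Dict.contains newD path))) (fun x => x) false
    = (pvK oldD newD).filter (fun p => PySem.Dict.contains oldD p && !(PySem.Dict.contains newD p)) := by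
  apply PySem.List.sorted_eq_of_perm_of_pairwise_lt
  · rw [List.perm_ext_iff_of_nodup ((pvK_nodup oldD newD).filter _) (hno.filter _)]
    intro a
    simp only [List.mem_filter, pvK_mem, Bool.and_eq_true, Bool.not_eq_eq_eq_not, Bool.not_true,
      ← PySem.Dict.contains_iff_mem_keys]
    cases h : PySem.Dict.contains oldD a <;> simp
  · exact List.Pairwise.sublist List.filter_sublist (pvK_pairwise oldD newD)

theorem pv_gkey (p oh nh : String) :
    PySem.Dict.getD (PySem.Dict.mk [("path", p), ("old_hash", oh), ("new_hash", nh)]) "path" "" = p := by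
  simp [PySem.Dict.getD_eq_get?_getD, PySem.Dict.get?_mk_cons]

theorem pv_changed (oldD newD : PySem.Dict String String)
    (hnn : (PySem.Dict.keys newD).Nodup) :
    PySem.List.sorted
      (((PySem.Dict.keys newD).map (fun k => (k, PySem.Dict.getD newD k ""))).foldl
        (fun (acc : List (List (String × String))) pn =>
          match PySem.Dict.get? oldD pn.1 with
          | none => acc
          | some old_hash =>
            if old_hash ≠ pn.2 then acc ++ [[("path", pn.1), ("old_hash", old_hash), ("new_hash", pn.2)]]
            else acc) [])
      (fun entry => PySem.Dict.getD (PySem.Dict.mk entry) "path" "") false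
    = ((pvK oldD newD).filter (fun p => PySem.Dict.contains oldD p && PySem.Dict.contains newD p
          && decide (PySem.Dict.getD oldD p "" ≠ PySem.Dict.getD newD p ""))).map
        (fun p => [("path", p), ("old_hash", PySem.Dict.getD oldD p ""), ("new_hash", PySem.Dict.getD newD p "")]) := by
  rw [pvA_fold, List.nil_append, List.filter_map, List.map_map]
  apply PySem.List.sorted_eq_of_perm_of_pairwise_lt
  · apply List.Perm.map
    rw [List.perm_ext_iff_of_nodup ((pvK_nodup oldD newD).filter _) (hnn.filter _)]
    intro a
    simp only [List.mem_filter, pvK_mem, Bool.and_eq_true, decide_eq_true_eq, Function.comp,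
      PySem.Dict.contains_iff_mem_keys, Option.isSome_iff_ne_none, ne_eq,
      PySem.Dict.get?_eq_none_iff_not_mem_keys, not_not]
    tauto
  · rw [List.pairwise_map]
    refine (List.Pairwise.sublist List.filter_sublist (pvK_pairwise oldD newD)).imp ?_
    intro a b hab
    simpa [pv_gkey] using hab

-- the equality, with the two dicts abstracted
theorem pv_main (oldD newD : PySem.Dict String String)
    (hno : (PySem.Dict.keys oldD).Nodup) (hnn : (PySem.Dict.keys newD).Nodup) :
    (PySem.List.sorted ((PySem.Dict.keys newD).filter (fun path => !(PySem.Dict.contains oldD path))) (fun x => x) false,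
     PySem.List.sorted ((PySem.Dict.keys oldD).filter (fun path => !(PySem.Dict.contains newD path))) (fun x => x) false,
     PySem.List.sorted
       (newD.items.foldl (fun (acc : List (List (String × String))) pn =>
          match PySem.Dict.get? oldD pn.1 with
          | none => acc
          | some old_hash =>
            if old_hash ≠ pn.2 then acc ++ [[("path", pn.1), ("old_hash", old_hash), ("new_hash", pn.2)]]
            else acc) [])
       (fun entry => PySem.Dict.getD (PySem.Dict.mk entry) "path" "") false)
    = (PySem.List.sorted (PySem.Set.union (PySem.Set.ofList (PySem.Dict.keys oldD)) (PySem.Dict.keys newD)) (fun x => x) false).foldl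
        (fun (acc : List String × List String × List (List (String × String))) path =>
          if !(PySem.Dict.contains oldD path) then (acc.1 ++ [path], acc.2.1, acc.2.2)
          else if !(PySem.Dict.contains newD path) then (acc.1, acc.2.1 ++ [path], acc.2.2)
          else if PySem.Dict.getD oldD path "" ≠ PySem.Dict.getD newD path "" then
            (acc.1, acc.2.1, acc.2.2 ++ [[("path", path), ("old_hash", PySem.Dict.getD oldD path ""), ("new_hash", PySem.Dict.getD newD path "")]])
          else acc) ([], [], []) := by
  have hU : PySem.Set.union (PySem.Set.ofList (PySem.Dict.keys oldD)) (PySem.Dict.keys newD)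
      = PySem.Set.ofList (PySem.Dict.keys oldD ++ PySem.Dict.keys newD) := by
    rw [PySem.Set.ofList_append]; rfl
  rw [hU]
  rw [show PySem.List.sorted (PySem.Set.ofList (PySem.Dict.keys oldD ++ PySem.Dict.keys newD)) (fun x => x) false = pvK oldD newD from rfl]
  rw [pvB_fold]
  simp only [List.nil_append]
  refine Prod.ext ?_ (Prod.ext ?_ ?_)
  · exact pv_added oldD newD hnn
  · exact pv_removed oldD newD hno
  · rw [PySem.Dict.items_eq_map_keys newD hnn ""]
    exact pv_changed oldD newD hnn

-- ===== VERDICT (by name: the statement is the Claim_ definition above) =====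
theorem diff_hashes_py_spec : Claim_equal_diff_hashes_py := by
  intro old new _
  unfold Spec_diff_hashes_py diff_hashes_py diff_hashes_py_alt
  exact pv_main (PySem.Dict.ofList old) (PySem.Dict.ofList new)
    (PySem.Dict.nodup_keys_ofList ..) (PySem.Dict.nodup_keys_ofList ..)
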